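-- pv_equiv track=rewrite | github.com/notromanramirez/advent-of-code_2023 | day01-trebuchet/day01.py | calc_line_v2
-- ===== SOURCE A (Python) =====
-- def calc_line_v2(line):
--     word2num = {
--         "one":1,
--         "two":2,
--         "three":3,
--         "four":4,
--         "five":5,
--         "six":6,
--         "seven":7,
--         "eight":8,
--         "nine":9,
--         "zero":0
--     }
--
--     first_num = None
--     last_num = None
--
--     # looking for first_num with a forward search
--     i = 0
--     while first_num is None:
--         if line[i].isalpha():
--             for (k,v) in word2num.items():
--                 if line[i:i+len(k)] == k:
--                     first_num = str(v)
--         elif not line[i].isalpha():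
--             first_num = line[i]
--         i += 1
--
--     # looking for last_num with a backwards search
--     i = len(line)-1
--     while last_num is None:
--         if line[i].isalpha():
--             for (k,v) in word2num.items():
--                 if line[i-len(k)+1:i+1] == k:
--                     last_num = str(v)
--         elif not line[i].isalpha():
--             last_num = line[i]
--         i -= 1
--     return int(first_num + last_num)
-- ===== SOURCE B (Python) =====
-- WORDS = [("one", "1"), ("two", "2"), ("three", "3"), ("four", "4"), ("five", "5"),
--          ("six", "6"), ("seven", "7"), ("eight", "8"), ("nine", "9"), ("zero", "0")]
--
-- def _tok(line, i, ch):
--     """Token starting at index i: the char itself if non-alphabetic,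
--     else the digit of a spelled-out number word starting here, else None."""
--     if ch.isalpha():
--         for (k, v) in WORDS:
--             if line[i:i+len(k)] == k:
--                 return v
--         return None
--     return ch
--
-- def calc_line_v2(line):
--     nums = []
--     for i, ch in enumerate(line):
--         t = _tok(line, i, ch)
--         if t is not None:
--             nums.append(t)
--     return int(nums[0] + nums[-1])
-- ===== Notes on version B (the rewrite author's own statement) =====
-- stated objective: simpler
-- what changed: A's two separate while-loop searches (forward for the first number, backward with end-anchored slices for the last) are replaced by one forward sweep that collects every digit/word token into a list and indexes its first and last elements.
import Mathlib
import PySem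

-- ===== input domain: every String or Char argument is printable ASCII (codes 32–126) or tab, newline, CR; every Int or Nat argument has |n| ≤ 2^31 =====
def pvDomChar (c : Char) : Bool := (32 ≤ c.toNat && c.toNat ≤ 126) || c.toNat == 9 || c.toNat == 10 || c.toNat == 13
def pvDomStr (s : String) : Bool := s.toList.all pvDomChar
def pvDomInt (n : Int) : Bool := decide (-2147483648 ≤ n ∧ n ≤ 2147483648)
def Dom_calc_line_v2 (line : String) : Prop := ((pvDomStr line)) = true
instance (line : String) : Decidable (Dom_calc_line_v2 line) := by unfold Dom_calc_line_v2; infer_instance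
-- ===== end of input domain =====

-- B replaces A's separate forward and backward while-searches by ONE forward sweep that
-- collects every digit/word token into a list and indexes its two ends (objective: simpler).

-- ===== PORT A =====
-- the word2num dict, in insertion order (Python iterates it in this order)
def pvWordsA : List (List Char × Int) :=
  [(['o','n','e'], 1), (['t','w','o'], 2), (['t','h','r','e','e'], 3), (['f','o','u','r'], 4),
   (['f','i','v','e'], 5), (['s','i','x'], 6), (['s','e','v','e','n'], 7), (['e','i','g','h','t'], 8),
   (['n','i','n','e'], 9), (['z','e','r','o'], 0)]

-- A's inner 'for (k,v) in word2num.items(): if line[i:i+len(k)] == k: first_num = str(v)'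
-- (no break: a later match would overwrite; first_num starts each sweep as None)
def pvInnerFwd (cs : List Char) (i : Nat) : Option (List Char) :=
  pvWordsA.foldl (fun acc kv =>
    if PySem.List.slice cs (some (i : Int)) (some ((i : Int) + (kv.1.length : Int))) = kv.1
    then some (PySem.Int.toChars kv.2) else acc) none

-- A's 'while first_num is None' loop; 'if line[i].isalpha(): … elif not line[i].isalpha(): …'
-- is an exhaustive if/else.  i ≥ len(line) is Python's IndexError: none (excluded by Pre_).
def pvFwdA (cs : List Char) (i : Nat) : Option (List Char) :=
  if h : i < cs.length then
    match (if PySem.Chars.isalpha cs[i] then pvInnerFwd cs i else some [cs[i]]) with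
    | some s => some s
    | none => pvFwdA cs (i + 1)
  else none
termination_by cs.length - i

-- A's inner loop of the backward search: 'if line[i-len(k)+1:i+1] == k'
def pvInnerBwd (cs : List Char) (i : Int) : Option (List Char) :=
  pvWordsA.foldl (fun acc kv =>
    if PySem.List.slice cs (some (i - (kv.1.length : Int) + 1)) (some (i + 1)) = kv.1
    then some (PySem.Int.toChars kv.2) else acc) none

-- A's 'while last_num is None' loop, i decreasing; line[i] wraps for -len ≤ i < 0 and
-- raises IndexError below -len: none.  The 'if hin' guard only makes the recursion total.
def pvBwdA (cs : List Char) (i : Int) : Option (List Char) :=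
  if hin : -(cs.length : Int) ≤ i then
    match PySem.List.pyGet? cs i with
    | none => none
    | some c =>
      match (if PySem.Chars.isalpha c then pvInnerBwd cs i else some [c]) with
      | some s => some s
      | none => pvBwdA cs (i - 1)
  else none
termination_by (i + cs.length + 1).toNat
decreasing_by omega

-- 'return int(first_num + last_num)'; none anywhere = Python raised (excluded by Pre_), 0 placeholder
def calc_line_v2 (line : String) : Int :=
  match pvFwdA line.toList 0, pvBwdA line.toList ((line.toList.length : Int) - 1) with
  | some f, some l => (PySem.Int.ofChars? (f ++ l)).getD 0
  | _, _ => 0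

-- ===== PORT B =====
def pvWordsB : List (List Char × List Char) :=
  [(['o','n','e'], ['1']), (['t','w','o'], ['2']), (['t','h','r','e','e'], ['3']), (['f','o','u','r'], ['4']),
   (['f','i','v','e'], ['5']), (['s','i','x'], ['6']), (['s','e','v','e','n'], ['7']), (['e','i','g','h','t'], ['8']),
   (['n','i','n','e'], ['9']), (['z','e','r','o'], ['0'])]

-- Source B's '_tok' inner word loop: first match returns, fall-through returns None
def pvFindWord (cs : List Char) (i : Int) : List (List Char × List Char) → Option (List Char)
  | [] => none
  | kv :: rest =>
    if PySem.List.slice cs (some i) (some (i + (kv.1.length : Int))) = kv.1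
    then some kv.2 else pvFindWord cs i rest

-- Source B's '_tok(line, i, ch)'
def pvTokB (cs : List Char) (i : Int) (c : Char) : Option (List Char) :=
  if PySem.Chars.isalpha c then pvFindWord cs i pvWordsB else some [c]

-- Source B: one sweep over enumerate(line) appending tokens, then int(nums[0] + nums[-1])
def calc_line_v2_alt (line : String) : Int :=
  let cs := line.toList
  let nums := (PySem.List.enumerate cs 0).foldl
    (fun acc p => match pvTokB cs p.1 p.2 with
      | some t => acc ++ [t]
      | none => acc) ([] : List (List Char))
  match PySem.List.pyGet? nums 0 with
  | none => 0
  | some f =>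
    match PySem.List.pyGet? nums (-1) with
    | none => 0
    | some l => (PySem.Int.ofChars? (f ++ l)).getD 0

-- ===== PRECONDITION & SPEC =====
-- the ten spelled-out words with the digit character each stands for
def pvPreWords : List (List Char × Char) :=
  [(['o','n','e'], '1'), (['t','w','o'], '2'), (['t','h','r','e','e'], '3'), (['f','o','u','r'], '4'),
   (['f','i','v','e'], '5'), (['s','i','x'], '6'), (['s','e','v','e','n'], '7'), (['e','i','g','h','t'], '8'),
   (['n','i','n','e'], '9'), (['z','e','r','o'], '0')]

-- the digit character of the first number word starting at index i, if any
def pvWordCharAt (cs : List Char) (i : Nat) : Option Char :=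
  pvPreWords.findSome? (fun kv => if (cs.drop i).take kv.1.length = kv.1 then some kv.2 else none)

-- the character the token starting at index i contributes: a non-alphabetic character
-- stands for itself, an alphabetic position for the digit of a number word starting there
def pvTokCharAt (cs : List Char) (i : Nat) : Option Char :=
  if h : i < cs.length then
    if PySem.Chars.isalpha cs[i] then pvWordCharAt cs i else some cs[i]
  else none

-- int(c1 + c2) succeeds exactly for these two-character combinations
def pvValidPair (c1 c2 : Char) : Bool :=
  (PySem.Chars.isdigit c2 && (PySem.Chars.isdigit c1 || c1 == '+' || c1 == '-' || PySem.Chars.isspace c1)) ||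
  (PySem.Chars.isdigit c1 && PySem.Chars.isspace c2)

def pvEndsOK (cs : List Char) (i j : Nat) : Bool :=
  match pvTokCharAt cs i with
  | none => false
  | some c1 =>
    match pvTokCharAt cs j with
    | none => false
    | some c2 => pvValidPair c1 c2

-- Pre_ admits exactly the inputs on which Python A returns: some token exists (otherwise the
-- forward search runs off the end, IndexError) and the first and last token characters form a
-- valid two-character int literal (otherwise int() raises ValueError).
def Pre_calc_line_v2 (line : String) : Prop :=
  ∃ i ∈ List.range line.toList.length, ∃ j ∈ List.range line.toList.length,
    (∀ k ∈ List.range i, pvTokCharAt line.toList k = none) ∧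
    (∀ k ∈ List.range line.toList.length, j < k → pvTokCharAt line.toList k = none) ∧
    pvEndsOK line.toList i j = true
instance (line : String) : Decidable (Pre_calc_line_v2 line) := by unfold Pre_calc_line_v2; infer_instance

def pvWitness_calc_line_v2 : String := "two1nine"

def Spec_calc_line_v2 (line : String) (out : Int) : Prop := out = calc_line_v2_alt line
instance (line : String) (out : Int) : Decidable (Spec_calc_line_v2 line out) := by unfold Spec_calc_line_v2; infer_instance

-- ===== CLAIM (what is proved, stated in full; the proofs are below) =====
def Claim_equal_calc_line_v2 : Prop := ∀ (line : String), Dom_calc_line_v2 line → Pre_calc_line_v2 line → Spec_calc_line_v2 line (calc_line_v2 line)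

-- ===== LEMMAS AND PROOFS =====

-- one-character token string
def pvWrap (c : Char) : List Char := [c]

-- A's backward per-index step, with the index char fetched totally (used only in proofs)
def pvStepB (cs : List Char) (m : Nat) : Option (List Char) :=
  match cs[m]? with
  | some c => if PySem.Chars.isalpha c then pvInnerBwd cs (m : Int) else some [c]
  | none => none

-- ---- finite facts about the ten number words (kernel computation) ----

lemma pvCorrA : pvWordsA.map (fun kv => (kv.1, PySem.Int.toChars kv.2))
    = pvPreWords.map (fun kv => (kv.1, [kv.2])) := by rfl

lemma pvCorrB : pvWordsB.map (fun kv => (kv.1, kv.2))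
    = pvPreWords.map (fun kv => (kv.1, [kv.2])) := by rfl

lemma pvDF1 : ∀ kv ∈ pvPreWords, ∀ kv' ∈ pvPreWords,
    kv.1.length ≤ kv'.1.length → kv'.1.take kv.1.length = kv.1 → kv = kv' := by decide

lemma pvDF2 : ∀ kv ∈ pvPreWords, ∀ c ∈ kv.1, PySem.Chars.isalpha c = true := by
  intro kv hkv c hc
  fin_cases hkv <;> fin_cases hc <;> rfl

lemma pvDF3 : ∀ kv ∈ pvPreWords, ∀ kv' ∈ pvPreWords, ∀ d ∈ List.range 6,
    1 ≤ d → d + kv'.1.length ≤ kv.1.length → (kv.1.drop d).take kv'.1.length ≠ kv'.1 := by decide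

lemma pvDF4 : ∀ kv ∈ pvPreWords, 0 < kv.1.length ∧ kv.1.length ≤ 5 := by decide

-- ---- generic list/option helpers ----

lemma pvGenEx {α β γ : Type} (l : List α) (l' : List β) (f : α → γ) (g : β → γ)
    (h : l.map f = l'.map g) : ∀ a ∈ l, ∃ b ∈ l', f a = g b := by
  induction l generalizing l' with
  | nil => intro a ha; cases ha
  | cons x t ih =>
    cases l' with
    | nil => cases h
    | cons y t' =>
      simp only [List.map_cons, List.cons.injEq] at h
      intro a ha
      rcases List.mem_cons.mp ha with rfl | hm
      · exact ⟨y, by simp, h.1⟩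
      · rcases ih t' h.2 a hm with ⟨b, hb, he⟩
        exact ⟨b, by simp [hb], he⟩

lemma pvM1 : ∀ kv ∈ pvWordsA, ∃ kv' ∈ pvPreWords,
    kv.1 = kv'.1 ∧ PySem.Int.toChars kv.2 = [kv'.2] := by
  intro kv hkv
  rcases pvGenEx _ _ _ _ pvCorrA kv hkv with ⟨kv', hkv', he⟩
  exact ⟨kv', hkv', congrArg Prod.fst he, congrArg Prod.snd he⟩

lemma pvM2 : ∀ kv' ∈ pvPreWords, ∃ kv ∈ pvWordsA,
    kv.1 = kv'.1 ∧ PySem.Int.toChars kv.2 = [kv'.2] := by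
  intro kv' hkv'
  rcases pvGenEx _ _ _ _ pvCorrA.symm kv' hkv' with ⟨kv, hkv, he⟩
  exact ⟨kv, hkv, (congrArg Prod.fst he).symm, (congrArg Prod.snd he).symm⟩

lemma pvM1B : ∀ kv ∈ pvWordsB, ∃ kv' ∈ pvPreWords,
    kv.1 = kv'.1 ∧ kv.2 = [kv'.2] := by
  intro kv hkv
  rcases pvGenEx _ _ _ _ pvCorrB kv hkv with ⟨kv', hkv', he⟩
  exact ⟨kv', hkv', congrArg Prod.fst he, congrArg Prod.snd he⟩

lemma pvM2B : ∀ kv' ∈ pvPreWords, ∃ kv ∈ pvWordsB,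
    kv.1 = kv'.1 ∧ kv.2 = [kv'.2] := by
  intro kv' hkv'
  rcases pvGenEx _ _ _ _ pvCorrB.symm kv' hkv' with ⟨kv, hkv, he⟩
  exact ⟨kv, hkv, (congrArg Prod.fst he).symm, (congrArg Prod.snd he).symm⟩

lemma pvIfOr {α : Type} (c : Prop) [Decidable c] (v : α) (acc : Option α) :
    (if c then some v else acc) = (if c then some v else none).or acc := by
  split <;> simp

lemma pvFoldlOrNone {α β : Type} (l : List α) (f : α → Option β)
    (h : ∀ a ∈ l, f a = none) :
    ∀ init : Option β, l.foldl (fun acc a => (f a).or acc) init = init := by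
  induction l with
  | nil => intro init; rfl
  | cons a t ih =>
    intro init
    simp only [List.foldl_cons, h a (by simp), Option.none_or]
    exact ih (fun x hx => h x (by simp [hx])) init

lemma pvFoldlOrSome {α β : Type} (l : List α) (f : α → Option β) (x : β)
    (hex : ∃ a ∈ l, f a = some x)
    (huniq : ∀ a ∈ l, ∀ y, f a = some y → y = x) :
    ∀ init : Option β, l.foldl (fun acc a => (f a).or acc) init = some x := by
  induction l with
  | nil => rcases hex with ⟨a, ha, _⟩; cases ha
  | cons a t ih =>
    intro init
    have huniq' : ∀ b ∈ t, ∀ y, f b = some y → y = x :=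
      fun b hb y hy => huniq b (by simp [hb]) y hy
    by_cases hta : ∃ b ∈ t, f b = some x
    · cases hfa : f a with
      | none => simpa [List.foldl_cons, hfa] using ih hta huniq' init
      | some y =>
        have hyx : y = x := huniq a (by simp) y hfa
        subst hyx
        simpa [List.foldl_cons, hfa] using ih hta huniq' (some y)
    · have htnone : ∀ b ∈ t, f b = none := by
        intro b hb
        cases hfb : f b with
        | none => rfl
        | some y =>
          have := huniq' b hb y hfb
          subst this
          exact absurd ⟨b, hb, hfb⟩ hta
      rcases hex with ⟨a', ha', hfa'⟩
      rcases List.mem_cons.mp ha' with rfl | hmem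
      · simp only [List.foldl_cons, hfa', Option.some_or]
        exact pvFoldlOrNone t f htnone _
      · exact absurd ((htnone a' hmem) ▸ hfa') (by simp)

lemma pvFindSomeSome {α β : Type} (l : List α) (f : α → Option β) (x : β)
    (hex : ∃ a ∈ l, f a = some x)
    (huniq : ∀ a ∈ l, ∀ y, f a = some y → y = x) :
    l.findSome? f = some x := by
  induction l with
  | nil => rcases hex with ⟨a, ha, _⟩; cases ha
  | cons a t ih =>
    cases hfa : f a with
    | some y =>
      have := huniq a (by simp) y hfa
      subst this
      simp [List.findSome?_cons, hfa]
    | none =>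
      rcases hex with ⟨a', ha', hfa'⟩
      rcases List.mem_cons.mp ha' with rfl | hmem
      · rw [hfa] at hfa'; cases hfa'
      · simpa [List.findSome?_cons, hfa] using
          ih ⟨a', hmem, hfa'⟩ (fun b hb y hy => huniq b (by simp [hb]) y hy)

-- ---- properties of word matches ----

lemma pvUniqAt (cs : List Char) (a : Nat) {kv kv' : List Char × Char}
    (h : kv ∈ pvPreWords) (h' : kv' ∈ pvPreWords)
    (m1 : (cs.drop a).take kv.1.length = kv.1)
    (m2 : (cs.drop a).take kv'.1.length = kv'.1) : kv = kv' := by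
  rcases le_total kv.1.length kv'.1.length with hle | hle
  · apply pvDF1 kv h kv' h' hle
    rw [← m2, List.take_take, min_eq_left hle]
    exact m1
  · refine (pvDF1 kv' h' kv h hle ?_).symm
    rw [← m1, List.take_take, min_eq_left hle]
    exact m2

lemma pvSegLen (cs : List Char) (a : Nat) (w : List Char)
    (h : (cs.drop a).take w.length = w) (hw : 0 < w.length) : a + w.length ≤ cs.length := by
  have hl := congrArg List.length h
  simp only [List.length_take, List.length_drop] at hl
  omega

lemma pvSegGet (cs : List Char) (a d : Nat) (w : List Char)
    (h : (cs.drop a).take w.length = w) (hd : d < w.length) : cs[a + d]? = w[d]? := by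
  conv_rhs => rw [← h]
  rw [List.getElem?_take, if_pos hd, List.getElem?_drop]

lemma pvSegMemAlpha (cs : List Char) (a d : Nat) {kv : List Char × Char}
    (hkv : kv ∈ pvPreWords) (h : (cs.drop a).take kv.1.length = kv.1) (hd : d < kv.1.length) :
    ∃ c, cs[a + d]? = some c ∧ PySem.Chars.isalpha c = true := by
  refine ⟨kv.1[d], ?_, pvDF2 kv hkv _ (List.getElem_mem hd)⟩
  rw [pvSegGet cs a d kv.1 h hd, List.getElem?_eq_getElem hd]

lemma pvMatchTok (cs : List Char) (a : Nat) {kv : List Char × Char}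
    (hkv : kv ∈ pvPreWords) (h : (cs.drop a).take kv.1.length = kv.1) :
    a < cs.length ∧ pvTokCharAt cs a ≠ none := by
  have hw0 := (pvDF4 kv hkv).1
  have hle := pvSegLen cs a kv.1 h hw0
  have ha : a < cs.length := by omega
  refine ⟨ha, ?_⟩
  rcases pvSegMemAlpha cs a 0 hkv h hw0 with ⟨c, hc, hal⟩
  rw [Nat.add_zero, List.getElem?_eq_getElem ha] at hc
  have hcs : cs[a] = c := by injection hc
  rw [pvTokCharAt, dif_pos ha, if_pos (by rw [hcs]; exact hal)]
  intro heq
  rw [pvWordCharAt] at heq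
  have := List.findSome?_eq_none_iff.mp heq kv hkv
  rw [if_pos h] at this
  cases this

lemma pvInside (cs : List Char) {kv kv₀ : List Char × Char} (a j₀ : Nat)
    (hkv : kv ∈ pvPreWords) (hkv₀ : kv₀ ∈ pvPreWords)
    (ha : (cs.drop a).take kv.1.length = kv.1)
    (hj : (cs.drop j₀).take kv₀.1.length = kv₀.1)
    (h1 : a < j₀) (h2 : j₀ - a + kv₀.1.length ≤ kv.1.length) : False := by
  have hlen5 := (pvDF4 kv hkv).2
  have hw0 := (pvDF4 kv₀ hkv₀).1
  set d := j₀ - a with hd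
  have hd1 : 1 ≤ d := by omega
  have hdr : d < 6 := by omega
  apply pvDF3 kv hkv kv₀ hkv₀ d (List.mem_range.mpr hdr) hd1 h2
  have hstep : kv.1.drop d = (cs.drop j₀).take (kv.1.length - d) := by
    conv_lhs => rw [← ha]
    rw [List.drop_take, List.drop_drop]
    congr 2
    omega
  rw [hstep, List.take_take, min_eq_left (by omega), hj]

-- ---- the three per-index evaluators all compute pvTokCharAt ----

lemma pvInnerFwdOr (cs : List Char) (i : Nat) :
    pvInnerFwd cs i = pvWordsA.foldl (fun acc kv =>
      ((fun kv : List Char × Int =>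
        if PySem.List.slice cs (some (i : Int)) (some ((i : Int) + (kv.1.length : Int))) = kv.1
        then some (PySem.Int.toChars kv.2) else none) kv).or acc) none := by
  unfold pvInnerFwd
  congr 1
  funext acc kv
  exact pvIfOr _ _ _

lemma pvInnerBwdOr (cs : List Char) (i : Int) :
    pvInnerBwd cs i = pvWordsA.foldl (fun acc kv =>
      ((fun kv : List Char × Int =>
        if PySem.List.slice cs (some (i - (kv.1.length : Int) + 1)) (some (i + 1)) = kv.1
        then some (PySem.Int.toChars kv.2) else none) kv).or acc) none := by
  unfold pvInnerBwd
  congr 1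
  funext acc kv
  exact pvIfOr _ _ _

lemma pvInnerFwdEq (cs : List Char) (i : Nat) :
    pvInnerFwd cs i = (pvWordCharAt cs i).map pvWrap := by
  rw [pvInnerFwdOr]
  cases hw : pvWordCharAt cs i with
  | none =>
    rw [pvWordCharAt] at hw
    have hall := List.findSome?_eq_none_iff.mp hw
    simp only [Option.map_none]
    apply pvFoldlOrNone
    intro kv hkv
    simp only [PySem.List.slice_natCast_add]
    split
    next hc =>
      exfalso
      rcases pvM1 kv hkv with ⟨kv', hkv', hw1, _⟩
      have hc' : (cs.drop i).take kv'.1.length = kv'.1 := by rw [← hw1]; exact hc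
      have := hall kv' hkv'
      rw [if_pos hc'] at this
      cases this
    next => rfl
  | some c =>
    rw [pvWordCharAt] at hw
    rcases List.exists_of_findSome?_eq_some hw with ⟨kv', hkv', hf⟩
    have hcond : (cs.drop i).take kv'.1.length = kv'.1 ∧ kv'.2 = c := by
      split at hf
      · exact ⟨by assumption, by injection hf⟩
      · cases hf
    simp only [Option.map_some]
    apply pvFoldlOrSome
    · rcases pvM2 kv' hkv' with ⟨kv, hkv, he1, he2⟩
      refine ⟨kv, hkv, ?_⟩
      simp only [PySem.List.slice_natCast_add]
      rw [he1, if_pos hcond.1, he2, hcond.2]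
      rfl
    · intro kv hkv y hy
      simp only [PySem.List.slice_natCast_add] at hy
      split at hy
      · rename_i hc
        rcases pvM1 kv hkv with ⟨kv'', hkv'', hw1, hv1⟩
        have hc'' : (cs.drop i).take kv''.1.length = kv''.1 := by rw [← hw1]; exact hc
        have hk : kv'' = kv' := pvUniqAt cs i hkv'' hkv' hc'' hcond.1
        have : y = PySem.Int.toChars kv.2 := by injection hy.symm
        rw [this, hv1, hk, hcond.2]
        rfl
      · cases hy

lemma pvFindWordFS (cs : List Char) (i : Int) (ws : List (List Char × List Char)) :
    pvFindWord cs i ws = ws.findSome? (fun kv =>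
      if PySem.List.slice cs (some i) (some (i + (kv.1.length : Int))) = kv.1
      then some kv.2 else none) := by
  induction ws with
  | nil => rfl
  | cons kv rest ih =>
    rw [pvFindWord, List.findSome?_cons]
    split
    · rfl
    · exact ih

lemma pvFindWordEq (cs : List Char) (i : Nat) :
    pvFindWord cs (i : Int) pvWordsB = (pvWordCharAt cs i).map pvWrap := by
  rw [pvFindWordFS]
  cases hw : pvWordCharAt cs i with
  | none =>
    rw [pvWordCharAt] at hw
    have hall := List.findSome?_eq_none_iff.mp hw
    simp only [Option.map_none]
    rw [List.findSome?_eq_none_iff]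
    intro kv hkv
    simp only [PySem.List.slice_natCast_add]
    split
    next hc =>
      exfalso
      rcases pvM1B kv hkv with ⟨kv', hkv', hw1, _⟩
      have hc' : (cs.drop i).take kv'.1.length = kv'.1 := by rw [← hw1]; exact hc
      have := hall kv' hkv'
      rw [if_pos hc'] at this
      cases this
    next => rfl
  | some c =>
    rw [pvWordCharAt] at hw
    rcases List.exists_of_findSome?_eq_some hw with ⟨kv', hkv', hf⟩
    have hcond : (cs.drop i).take kv'.1.length = kv'.1 ∧ kv'.2 = c := by
      split at hf
      · exact ⟨by assumption, by injection hf⟩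
      · cases hf
    simp only [Option.map_some]
    apply pvFindSomeSome
    · rcases pvM2B kv' hkv' with ⟨kv, hkv, he1, he2⟩
      refine ⟨kv, hkv, ?_⟩
      simp only [PySem.List.slice_natCast_add]
      rw [he1, if_pos hcond.1, he2, hcond.2]
      rfl
    · intro kv hkv y hy
      simp only [PySem.List.slice_natCast_add] at hy
      split at hy
      · rename_i hc
        rcases pvM1B kv hkv with ⟨kv'', hkv'', hw1, hv1⟩
        have hc'' : (cs.drop i).take kv''.1.length = kv''.1 := by rw [← hw1]; exact hc
        have hk : kv'' = kv' := pvUniqAt cs i hkv'' hkv' hc'' hcond.1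
        have : y = kv.2 := by injection hy.symm
        rw [this, hv1, hk, hcond.2]
        rfl
      · cases hy

lemma pvStepFwdEq (cs : List Char) (m : Nat) (h : m < cs.length) :
    (if PySem.Chars.isalpha (cs[m]'h) then pvInnerFwd cs m else some [cs[m]'h])
      = (pvTokCharAt cs m).map pvWrap := by
  rw [pvTokCharAt, dif_pos h]
  by_cases hal : PySem.Chars.isalpha (cs[m]'h) = true
  · rw [if_pos hal, if_pos hal, pvInnerFwdEq]
  · rw [if_neg hal, if_neg hal]
    rfl

lemma pvTokBEq (cs : List Char) (m : Nat) (h : m < cs.length) :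
    pvTokB cs (m : Int) (cs[m]'h) = (pvTokCharAt cs m).map pvWrap := by
  rw [pvTokB, pvTokCharAt, dif_pos h]
  by_cases hal : PySem.Chars.isalpha (cs[m]'h) = true
  · rw [if_pos hal, if_pos hal, pvFindWordEq]
  · rw [if_neg hal, if_neg hal]
    rfl

-- ---- A's forward search finds the first token ----

lemma pvFwdAEq (cs : List Char) (i₀ : Nat) (c : Char)
    (hi : i₀ < cs.length) (hc : pvTokCharAt cs i₀ = some c) :
    ∀ d k, k + d = i₀ → (∀ m, k ≤ m → m < i₀ → pvTokCharAt cs m = none) →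
      pvFwdA cs k = some [c] := by
  intro d
  induction d with
  | zero =>
    intro k hk _
    have hk0 : k = i₀ := by omega
    subst hk0
    rw [pvFwdA, dif_pos hi, pvStepFwdEq cs k hi, hc]
    rfl
  | succ d ih =>
    intro k hk hnone
    have hklt : k < i₀ := by omega
    have hkn : k < cs.length := by omega
    rw [pvFwdA, dif_pos hkn, pvStepFwdEq cs k hkn, hnone k (le_refl _) hklt]
    exact ih (k + 1) (by omega) (fun m hm1 hm2 => hnone m (by omega) hm2)

-- ---- A's backward search: slice characterisation and descent ----

lemma pvSliceEnd (cs : List Char) (m : Nat) (hm : m < cs.length) (w : List Char)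
    (hw : 0 < w.length) :
    (PySem.List.slice cs (some ((m : Int) - (w.length : Int) + 1)) (some ((m : Int) + 1)) = w)
      ↔ (w.length ≤ m + 1 ∧ (cs.drop (m + 1 - w.length)).take w.length = w) := by
  by_cases hle : w.length ≤ m + 1
  · have h1 : (m : Int) - (w.length : Int) + 1 = ((m + 1 - w.length : Nat) : Int) := by omega
    have h2 : (m : Int) + 1 = ((m + 1 : Nat) : Int) := by omega
    rw [h1, h2, PySem.List.slice_natCast]
    have h3 : (m + 1) - (m + 1 - w.length) = w.length := by omega
    rw [h3]
    exact ⟨fun h => ⟨hle, h⟩, fun h => h.2⟩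
  · constructor
    · intro hs
      exfalso
      have hlen := congrArg List.length hs
      rw [PySem.List.length_slice] at hlen
      have h2 : (m : Int) + 1 = ((m + 1 : Nat) : Int) := by omega
      have h1 : (m : Int) - (w.length : Int) + 1 = -(((w.length - (m + 1) : Nat)) : Int) := by omega
      rw [h1, h2, PySem.List.clampIdx_natCast,
        PySem.List.clampIdx_neg_natCast _ _ (by omega)] at hlen
      omega
    · intro h
      exact absurd h.1 hle

lemma pvSkip (cs : List Char) (j₀ e₀ : Nat)
    (hlast : ∀ k, j₀ < k → k < cs.length → pvTokCharAt cs k = none)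
    (hcover : ∀ kv ∈ pvPreWords, ∀ a : Nat,
      (cs.drop a).take kv.1.length = kv.1 → a ≤ j₀ → a + kv.1.length - 1 ≤ e₀)
    (hje : j₀ ≤ e₀) :
    ∀ m : Nat, e₀ < m → m < cs.length → pvStepB cs m = none := by
  intro m hm1 hm2
  rw [pvStepB, List.getElem?_eq_getElem hm2]
  show (if PySem.Chars.isalpha (cs[m]'hm2) then pvInnerBwd cs (m : Int)
    else some [cs[m]'hm2]) = none
  by_cases hal : PySem.Chars.isalpha (cs[m]'hm2) = true
  · simp only [if_pos hal]
    rw [pvInnerBwdOr]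
    apply pvFoldlOrNone
    intro kv hkv
    split
    next hc =>
      exfalso
      rcases pvM1 kv hkv with ⟨kv', hkv', hw1, _⟩
      have hc' : PySem.List.slice cs (some ((m : Int) - (kv'.1.length : Int) + 1))
          (some ((m : Int) + 1)) = kv'.1 := by rw [← hw1]; exact hc
      have hw0 := (pvDF4 kv' hkv').1
      have hmm := (pvSliceEnd cs m hm2 kv'.1 hw0).mp hc'
      have hmt := pvMatchTok cs (m + 1 - kv'.1.length) hkv' hmm.2
      have haj : m + 1 - kv'.1.length ≤ j₀ := by
        by_contra hgt
        exact hmt.2 (hlast _ (by omega) hmt.1)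
      have := hcover kv' hkv' _ hmm.2 haj
      omega
    next => rfl
  · simp only [if_neg hal]
    exfalso
    have htok := hlast m (by omega) hm2
    rw [pvTokCharAt, dif_pos hm2, if_neg hal] at htok
    cases htok

lemma pvBwdAEq (cs : List Char) (e₀ : Nat) (v : List Char)
    (he : e₀ < cs.length)
    (hhit : pvStepB cs e₀ = some v)
    (hskip : ∀ m : Nat, e₀ < m → m < cs.length → pvStepB cs m = none) :
    ∀ d m, m = e₀ + d → m < cs.length → pvBwdA cs (m : Int) = some v := by
  intro d
  induction d with
  | zero =>
    intro m hm hmn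
    have hme : m = e₀ := by omega
    subst hme
    rw [pvStepB, List.getElem?_eq_getElem hmn] at hhit
    have hhit2 : (if PySem.Chars.isalpha (cs[m]'hmn) then pvInnerBwd cs (m : Int)
        else some [cs[m]'hmn]) = some v := hhit
    rw [pvBwdA, dif_pos (by omega), PySem.List.pyGet?_natCast,
      List.getElem?_eq_getElem hmn]
    show (match (if PySem.Chars.isalpha (cs[m]'hmn) then pvInnerBwd cs (m : Int)
        else some [cs[m]'hmn]) with
      | some s => some s
      | none => pvBwdA cs ((m : Int) - 1)) = some v
    rw [hhit2]
  | succ d ih =>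
    intro m hm hmn
    have hsk := hskip m (by omega) hmn
    rw [pvStepB, List.getElem?_eq_getElem hmn] at hsk
    have hsk2 : (if PySem.Chars.isalpha (cs[m]'hmn) then pvInnerBwd cs (m : Int)
        else some [cs[m]'hmn]) = none := hsk
    rw [pvBwdA, dif_pos (by omega), PySem.List.pyGet?_natCast,
      List.getElem?_eq_getElem hmn]
    show (match (if PySem.Chars.isalpha (cs[m]'hmn) then pvInnerBwd cs (m : Int)
        else some [cs[m]'hmn]) with
      | some s => some s
      | none => pvBwdA cs ((m : Int) - 1)) = some v
    rw [hsk2]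
    have hc : (m : Int) - 1 = ((m - 1 : Nat) : Int) := by omega
    rw [hc]
    exact ih (m - 1) (by omega) (by omega)

-- ---- B's sweep produces the token list ----

lemma pvFoldAppend (cs : List Char) (l : List (Int × Char)) :
    ∀ init : List (List Char),
      l.foldl (fun acc p => match pvTokB cs p.1 p.2 with
        | some t => acc ++ [t] | none => acc) init
        = init ++ l.filterMap (fun p => pvTokB cs p.1 p.2) := by
  induction l with
  | nil => intro init; simp
  | cons a t ih =>
    intro init
    cases hfa : pvTokB cs a.1 a.2 <;>
      simp [List.foldl_cons, hfa, List.filterMap_cons, ih, List.append_assoc]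

lemma pvNumsEq (cs : List Char) :
    (PySem.List.enumerate cs 0).foldl (fun acc p => match pvTokB cs p.1 p.2 with
      | some t => acc ++ [t] | none => acc) ([] : List (List Char))
    = ((List.range cs.length).filterMap (pvTokCharAt cs)).map pvWrap := by
  rw [pvFoldAppend cs _ [], List.nil_append, PySem.List.enumerate_eq_map_pyRange cs 'a',
    PySem.List.pyRange_one, List.map_map, List.filterMap_map, List.map_filterMap]
  have hlen : (PySem.List.len cs - 0).toNat = cs.length := by
    simp [PySem.List.len]
  rw [hlen]
  apply List.filterMap_congr
  intro k hk
  have hk' : k < cs.length := List.mem_range.mp hk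
  simp only [Function.comp]
  have h0 : (0 : Int) + (k : Int) = (k : Int) := by omega
  rw [h0, PySem.List.pyGetD_natCast, List.getD_eq_getElem cs 'a' hk']
  exact pvTokBEq cs k hk'

lemma pvHeadFM (tok : Nat → Option Char) (n i₀ : Nat) (c : Char)
    (hi : i₀ < n) (hnone : ∀ k, k < i₀ → tok k = none) (hc : tok i₀ = some c) :
    ((List.range n).filterMap tok).head? = some c := by
  have hsplit : n = (i₀ + 1) + (n - (i₀ + 1)) := by omega
  rw [hsplit, List.range_add, List.filterMap_append, List.range_succ,
    List.filterMap_append]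
  have h1 : (List.range i₀).filterMap tok = [] := by
    rw [List.filterMap_eq_nil_iff]
    intro a ha
    exact hnone a (List.mem_range.mp ha)
  rw [h1]
  simp [hc]

lemma pvLastFM (tok : Nat → Option Char) (n j₀ : Nat) (c : Char)
    (hj : j₀ < n) (hnone : ∀ k, j₀ < k → k < n → tok k = none) (hc : tok j₀ = some c) :
    ((List.range n).filterMap tok).getLast? = some c := by
  have hsplit : n = (j₀ + 1) + (n - (j₀ + 1)) := by omega
  rw [hsplit, List.range_add, List.filterMap_append]
  have h2 : ((List.range (n - (j₀ + 1))).map (fun x => (j₀ + 1) + x)).filterMap tok = [] := by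
    rw [List.filterMap_eq_nil_iff]
    intro a ha
    rcases List.mem_map.mp ha with ⟨x, hx, rfl⟩
    have := List.mem_range.mp hx
    exact hnone _ (by omega) (by omega)
  rw [h2, List.append_nil, List.range_succ, List.filterMap_append]
  simp [hc, List.getLast?_concat]

-- ===== VERDICT (by name: the statement is the Claim_ definition above) =====
theorem calc_line_v2_spec : Claim_equal_calc_line_v2 := by
  intro line hdom hpre
  unfold Spec_calc_line_v2
  rcases hpre with ⟨i₀, hi₀r, j₀, hj₀r, hfirst, hlastr, hok⟩
  set cs := line.toList with hcs
  have hi₀ : i₀ < cs.length := List.mem_range.mp hi₀r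
  have hj₀ : j₀ < cs.length := List.mem_range.mp hj₀r
  cases hti : pvTokCharAt cs i₀ with
  | none => rw [pvEndsOK, hti] at hok; cases hok
  | some c1 =>
  cases htj : pvTokCharAt cs j₀ with
  | none => rw [pvEndsOK, hti, htj] at hok; cases hok
  | some c2 =>
  have hfirst' : ∀ m, m < i₀ → pvTokCharAt cs m = none :=
    fun m hm => hfirst m (List.mem_range.mpr hm)
  have hlast : ∀ k, j₀ < k → k < cs.length → pvTokCharAt cs k = none :=
    fun k h1 h2 => hlastr k (List.mem_range.mpr h2) h1
  -- A's forward search yields the first token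
  have hfwd : pvFwdA cs 0 = some [c1] :=
    pvFwdAEq cs i₀ c1 hi₀ hti i₀ 0 (by omega) (fun m _ hm => hfirst' m hm)
  -- the last token's end position e₀: a hit there, skips above it
  obtain ⟨e₀, hen, hhit, hskip⟩ :
      ∃ e₀ : Nat, e₀ < cs.length ∧ pvStepB cs e₀ = some [c2] ∧
        ∀ m : Nat, e₀ < m → m < cs.length → pvStepB cs m = none := by
    have htj' := htj
    rw [pvTokCharAt, dif_pos hj₀] at htj'
    by_cases halj : PySem.Chars.isalpha (cs[j₀]'hj₀) = true
    · -- the last token is a number word kv₀ starting at j₀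
      rw [if_pos halj, pvWordCharAt] at htj'
      rcases List.exists_of_findSome?_eq_some htj' with ⟨kv₀, hkv₀, hf⟩
      have hcond : (cs.drop j₀).take kv₀.1.length = kv₀.1 ∧ kv₀.2 = c2 := by
        split at hf
        · exact ⟨by assumption, by injection hf⟩
        · cases hf
      have hw0 := (pvDF4 kv₀ hkv₀).1
      have hseg := pvSegLen cs j₀ kv₀.1 hcond.1 hw0
      refine ⟨j₀ + kv₀.1.length - 1, by omega, ?_, ?_⟩
      · -- the hit at e₀
        have hen' : j₀ + kv₀.1.length - 1 < cs.length := by omega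
        rw [pvStepB, List.getElem?_eq_getElem hen']
        show (if PySem.Chars.isalpha (cs[j₀ + kv₀.1.length - 1]'hen') then
          pvInnerBwd cs ((j₀ + kv₀.1.length - 1 : Nat) : Int)
          else some [cs[j₀ + kv₀.1.length - 1]'hen']) = some [c2]
        have halpha : PySem.Chars.isalpha (cs[j₀ + kv₀.1.length - 1]'hen') = true := by
          rcases pvSegMemAlpha cs j₀ (kv₀.1.length - 1) hkv₀ hcond.1 (by omega) with ⟨c, hcg, hal⟩
          have he : j₀ + (kv₀.1.length - 1) = j₀ + kv₀.1.length - 1 := by omega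
          rw [he, List.getElem?_eq_getElem hen'] at hcg
          have : cs[j₀ + kv₀.1.length - 1]'hen' = c := by injection hcg
          rw [this]; exact hal
        rw [if_pos halpha, pvInnerBwdOr]
        apply pvFoldlOrSome
        · rcases pvM2 kv₀ hkv₀ with ⟨kv, hkv, he1, he2⟩
          refine ⟨kv, hkv, ?_⟩
          have hcnd : PySem.List.slice cs
              (some ((j₀ + kv₀.1.length - 1 : Nat) - (kv.1.length : Int) + 1))
              (some ((j₀ + kv₀.1.length - 1 : Nat) + 1)) = kv.1 := by
            rw [he1]
            apply (pvSliceEnd cs (j₀ + kv₀.1.length - 1) (by omega) kv₀.1 hw0).mpr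
            refine ⟨by omega, ?_⟩
            have he : j₀ + kv₀.1.length - 1 + 1 - kv₀.1.length = j₀ := by omega
            rw [he]
            exact hcond.1
          rw [if_pos hcnd, he2, hcond.2]
        · intro kv hkv y hy
          split at hy
          · rename_i hc
            rcases pvM1 kv hkv with ⟨kv', hkv', hw1, hv1⟩
            have hc' : PySem.List.slice cs
                (some ((j₀ + kv₀.1.length - 1 : Nat) - (kv'.1.length : Int) + 1))
                (some ((j₀ + kv₀.1.length - 1 : Nat) + 1)) = kv'.1 := by
              rw [← hw1]; exact hc
            have hw0' := (pvDF4 kv' hkv').1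
            have hmm := (pvSliceEnd cs (j₀ + kv₀.1.length - 1) (by omega) kv'.1 hw0').mp hc'
            have hmt := pvMatchTok cs (j₀ + kv₀.1.length - 1 + 1 - kv'.1.length) hkv' hmm.2
            have haj : j₀ + kv₀.1.length - 1 + 1 - kv'.1.length ≤ j₀ := by
              by_contra hgt
              exact hmt.2 (hlast _ (by omega) hmt.1)
            rcases Nat.lt_or_ge (j₀ + kv₀.1.length - 1 + 1 - kv'.1.length) j₀ with hlt | hge
            · exfalso
              exact pvInside cs _ j₀ hkv' hkv₀ hmm.2 hcond.1 hlt (by omega)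
            · have heq : j₀ + kv₀.1.length - 1 + 1 - kv'.1.length = j₀ := by omega
              rw [heq] at hmm
              have hk : kv' = kv₀ := pvUniqAt cs j₀ hkv' hkv₀ hmm.2 hcond.1
              have : y = PySem.Int.toChars kv.2 := by injection hy.symm
              rw [this, hv1, hk, hcond.2]
          · cases hy
      · -- skips above e₀
        apply pvSkip cs j₀ (j₀ + kv₀.1.length - 1) hlast ?_ (by omega)
        intro kv hkv a ha haj
        rcases Nat.lt_or_ge a j₀ with hlt | hge
        · by_contra hgt
          exact pvInside cs a j₀ hkv hkv₀ ha hcond.1 hlt (by omega)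
        · have heq : a = j₀ := by omega
          subst heq
          have hk : kv = kv₀ := pvUniqAt cs a hkv hkv₀ ha hcond.1
          rw [hk]
    · -- the last token is a plain non-alphabetic character at j₀
      rw [if_neg halj] at htj'
      have hc2 : cs[j₀]'hj₀ = c2 := by injection htj'
      refine ⟨j₀, hj₀, ?_, ?_⟩
      · rw [pvStepB, List.getElem?_eq_getElem hj₀]
        show (if PySem.Chars.isalpha (cs[j₀]'hj₀) then pvInnerBwd cs ((j₀ : Nat) : Int)
          else some [cs[j₀]'hj₀]) = some [c2]
        rw [if_neg halj, hc2]
      · apply pvSkip cs j₀ j₀ hlast ?_ (le_refl _)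
        intro kv hkv a ha haj
        by_contra hgt
        have hd : j₀ - a < kv.1.length := by omega
        rcases pvSegMemAlpha cs a (j₀ - a) hkv ha hd with ⟨c, hcg, hal⟩
        have he : a + (j₀ - a) = j₀ := by omega
        rw [he, List.getElem?_eq_getElem hj₀] at hcg
        have : cs[j₀]'hj₀ = c := by injection hcg
        rw [this] at halj
        exact halj hal
  -- A's backward search yields the last token
  have hbwd : pvBwdA cs ((cs.length : Int) - 1) = some [c2] := by
    have h1 : (cs.length : Int) - 1 = ((cs.length - 1 : Nat) : Int) := by omega
    rw [h1]
    exact pvBwdAEq cs e₀ [c2] hen hhit hskip (cs.length - 1 - e₀) (cs.length - 1)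
      (by omega) (by omega)
  -- B's sweep: head and last of the token list
  have hhead : ((List.range cs.length).filterMap (pvTokCharAt cs)).head? = some c1 :=
    pvHeadFM (pvTokCharAt cs) cs.length i₀ c1 hi₀ hfirst' hti
  have hlastq : ((List.range cs.length).filterMap (pvTokCharAt cs)).getLast? = some c2 :=
    pvLastFM (pvTokCharAt cs) cs.length j₀ c2 hj₀ hlast htj
  -- assemble both sides
  rw [calc_line_v2, calc_line_v2_alt, ← hcs, hfwd, hbwd]
  simp only [pvNumsEq cs, PySem.List.pyGet?_zero, PySem.List.pyGet?_neg_one,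
    ← List.head?_eq_getElem?, List.head?_map, List.getLast?_map, hhead, hlastq]
  rfl
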